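-- pv_equiv track=rewrite | github.com/mattthewb5/OfferingMemorandum | parse_street_index.py | normalize_street_name
-- ===== SOURCE A (Python) =====
-- def normalize_street_name(street: str) -> str:
--     """Normalize street name for matching"""
--     # Remove common suffixes and convert to lowercase
--     normalized = street.lower().strip()
--
--     # Standardize abbreviations
--     replacements = {
--         ' st': ' street',
--         ' ave': ' avenue',
--         ' rd': ' road',
--         ' dr': ' drive',
--         ' ln': ' lane',
--         ' ct': ' court',
--         ' cir': ' circle',
--         ' blvd': ' boulevard',
--         ' pkwy': ' parkway',
--         ' pl': ' place',
--     }
--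
--     for abbrev, full in replacements.items():
--         if normalized.endswith(abbrev):
--             normalized = normalized[:-len(abbrev)] + full
--
--     return normalized
-- ===== SOURCE B (Python) =====
-- REPLACEMENTS = {
--     ' st': ' street',
--     ' ave': ' avenue',
--     ' rd': ' road',
--     ' dr': ' drive',
--     ' ln': ' lane',
--     ' ct': ' court',
--     ' cir': ' circle',
--     ' blvd': ' boulevard',
--     ' pkwy': ' parkway',
--     ' pl': ' place',
-- }
--
--
-- def normalize_street_name(street: str) -> str:
--     """Normalize street name for matching"""
--     normalized = street.lower().strip()
--     idx = normalized.rfind(' ')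
--     if idx != -1:
--         full = REPLACEMENTS.get(normalized[idx:])
--         if full is not None:
--             normalized = normalized[:idx] + full
--     return normalized
-- ===== Notes on version B (the rewrite author's own statement) =====
-- stated objective: simpler
-- what changed: Replaces the 10-iteration endswith-scan (with repeated slicing) by locating the last space once with rfind and doing a single keyed dict lookup of the trailing token.
import Mathlib
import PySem

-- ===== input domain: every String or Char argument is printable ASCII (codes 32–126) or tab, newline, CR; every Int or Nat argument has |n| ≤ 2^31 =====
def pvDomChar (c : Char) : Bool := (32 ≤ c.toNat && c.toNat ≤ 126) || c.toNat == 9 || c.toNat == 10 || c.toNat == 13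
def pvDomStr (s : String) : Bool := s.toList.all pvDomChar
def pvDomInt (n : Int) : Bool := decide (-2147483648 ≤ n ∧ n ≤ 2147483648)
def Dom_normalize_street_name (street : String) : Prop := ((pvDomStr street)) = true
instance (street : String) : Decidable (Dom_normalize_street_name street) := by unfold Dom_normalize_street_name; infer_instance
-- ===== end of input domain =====

-- B replaces A's 10-iteration endswith-scan by locating the last space once with rfind
-- plus a single keyed dict lookup of the trailing token (objective: simpler); same return value.

-- ===== PORT A =====
-- the loop body of A's for-loop, as a named helper
def pvAstep (normalized : String) (p : String × String) : String :=
  if PySem.Str.endswith normalized p.1 = true then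
    PySem.Str.slice normalized none (some (-(PySem.Str.len p.1))) ++ p.2
  else normalized

def normalize_street_name (street : String) : String :=
  let normalized := PySem.Str.strip (PySem.Str.lower street)
  let replacements : PySem.Dict String String := PySem.Dict.mk
    [(" st", " street"), (" ave", " avenue"), (" rd", " road"), (" dr", " drive"),
     (" ln", " lane"), (" ct", " court"), (" cir", " circle"), (" blvd", " boulevard"),
     (" pkwy", " parkway"), (" pl", " place")]
  replacements.items.foldl pvAstep normalized

-- ===== PORT B =====
-- module-level REPLACEMENTS of Source B
def pvREPLACEMENTS : PySem.Dict String String := PySem.Dict.mk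
  [(" st", " street"), (" ave", " avenue"), (" rd", " road"), (" dr", " drive"),
   (" ln", " lane"), (" ct", " court"), (" cir", " circle"), (" blvd", " boulevard"),
   (" pkwy", " parkway"), (" pl", " place")]

def normalize_street_name_alt (street : String) : String :=
  let normalized := PySem.Str.strip (PySem.Str.lower street)
  let idx := PySem.Str.rfind normalized " "
  if idx ≠ -1 then
    match pvREPLACEMENTS.get? (PySem.Str.slice normalized (some idx) none) with
    | some full => PySem.Str.slice normalized none (some idx) ++ full
    | none => normalized
  else
    normalized

-- ===== PRECONDITION & SPEC =====
def Spec_normalize_street_name (street : String) (out : String) : Prop := out = normalize_street_name_alt street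
instance (street : String) (out : String) : Decidable (Spec_normalize_street_name street out) := by unfold Spec_normalize_street_name; infer_instance

-- ===== CLAIM (what is proved, stated in full; the proofs are below) =====
def Claim_equal_normalize_street_name : Prop := ∀ (street : String), Dom_normalize_street_name street → Spec_normalize_street_name street (normalize_street_name street)

-- ===== LEMMAS AND PROOFS =====

-- A's fold step, moved to the List Char side
def pvStep (cs : List Char) (p : String × String) : List Char :=
  if PySem.Chars.endswith cs p.1.toList = true then
    PySem.Chars.slice cs none (some (-(PySem.Str.len p.1))) ++ p.2.toList
  else cs

theorem pvAstep_toList (n : String) (p : String × String) :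
    (pvAstep n p).toList = pvStep n.toList p := by
  unfold pvAstep pvStep
  rw [PySem.Str.endswith_eq]
  split_ifs with h
  · simp
  · rfl

theorem pvFold_toList (l : List (String × String)) (n : String) :
    (l.foldl pvAstep n).toList = l.foldl pvStep n.toList := by
  induction l generalizing n with
  | nil => rfl
  | cons p l ih => rw [List.foldl_cons, List.foldl_cons, ih, pvAstep_toList]

-- the trailing token after the LAST space determines every suffix test
theorem pvSuffix_lastTok (y w v : List Char) (hw : ' ' ∉ w) (hv : ' ' ∉ v) :
    ((' ' :: v) <:+ (y ++ ' ' :: w)) ↔ v = w := by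
  constructor
  · intro h
    have h' : (' ' :: w) <:+ (y ++ ' ' :: w) := List.suffix_append y (' ' :: w)
    rcases List.suffix_or_suffix_of_suffix h h' with hs | hs
    · rcases List.suffix_cons_iff.mp hs with he | hs
      · exact (List.cons_eq_cons.mp he).2
      · exact absurd (hs.subset (List.mem_cons_self)) hw
    · rcases List.suffix_cons_iff.mp hs with he | hs
      · exact ((List.cons_eq_cons.mp he).2).symm
      · exact absurd (hs.subset (List.mem_cons_self)) hv
  · rintro rfl
    exact List.suffix_append y (' ' :: v)

theorem pvEndswith_lastTok (y w v : List Char) (hw : ' ' ∉ w) (hv : ' ' ∉ v) :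
    PySem.Chars.endswith (y ++ ' ' :: w) (' ' :: v) = decide (v = w) := by
  rw [Bool.eq_iff_iff]
  simp [PySem.Chars.endswith_iff, pvSuffix_lastTok y w v hw hv]

theorem pvFold_nomatch (l : List (String × String)) (cs : List Char)
    (h : ∀ p ∈ l, PySem.Chars.endswith cs p.1.toList = false) :
    l.foldl pvStep cs = cs := by
  induction l with
  | nil => rfl
  | cons p l ih =>
    rw [List.foldl_cons]
    have hp : pvStep cs p = cs := by
      unfold pvStep
      rw [h p List.mem_cons_self]
      simp
    rw [hp]
    exact ih (fun q hq => h q (List.mem_cons_of_mem p hq))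

theorem pvHead_cons (l : List Char) (h : l.head? = some ' ') : l = ' ' :: l.tail := by
  cases l with
  | nil => simp at h
  | cons a t => simp at h; simp [h]

-- the matched replacement step: suffix ' '::w replaced by p.2
theorem pvStep_match (y w : List Char) (p : String × String) (hp : p.1.toList = ' ' :: w)
    (hw : ' ' ∉ w) : pvStep (y ++ ' ' :: w) p = y ++ p.2.toList := by
  unfold pvStep
  rw [hp, pvEndswith_lastTok y w w hw hw]
  rw [if_pos (by simp)]
  have hlen : PySem.Str.len p.1 = (((' ' :: w).length : Nat) : Int) := by
    unfold PySem.Str.len; rw [hp]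
  rw [hlen, PySem.Chars.slice_eq_listSlice,
      PySem.List.slice_to_neg_natCast _ _ (by simp)]
  have h2 : (y ++ ' ' :: w).length - (' ' :: w).length = y.length := by
    simp [List.length_append]
  rw [h2, List.take_left]

-- A's whole fold on a string whose last space precedes w: a single keyed lookup
theorem pvFold_lastTok (l : List (String × String))
    (hk : ∀ p ∈ l, p.1.toList.head? = some ' ' ∧ ' ' ∉ p.1.toList.tail)
    (hf : ∀ p ∈ l, p.2.toList.head? = some ' ' ∧ ' ' ∉ p.2.toList.tail ∧
          ∀ q ∈ l, q.1.toList ≠ ' ' :: p.2.toList.tail)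
    (y w : List Char) (hw : ' ' ∉ w) :
    l.foldl pvStep (y ++ ' ' :: w) =
      match l.find? (fun p => p.1.toList == ' ' :: w) with
      | some p => y ++ p.2.toList
      | none => y ++ ' ' :: w := by
  induction l with
  | nil => rfl
  | cons p l ih =>
    obtain ⟨hh, ht⟩ := hk p List.mem_cons_self
    have hp1 : p.1.toList = ' ' :: p.1.toList.tail := pvHead_cons _ hh
    by_cases hvw : p.1.toList.tail = w
    · -- the head entry matches: replace, then nothing later matches
      rw [List.foldl_cons, pvStep_match y w p (hvw ▸ hp1) hw,
          List.find?_cons_of_pos (by rw [hp1, hvw]; simp)]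
      obtain ⟨fh, ft, fq⟩ := hf p List.mem_cons_self
      have hp2 : p.2.toList = ' ' :: p.2.toList.tail := pvHead_cons _ fh
      refine pvFold_nomatch l (y ++ p.2.toList) (fun q hq => ?_)
      obtain ⟨qh, qt⟩ := hk q (List.mem_cons_of_mem p hq)
      have hq1 : q.1.toList = ' ' :: q.1.toList.tail := pvHead_cons _ qh
      rw [hq1]
      conv_lhs => rw [show y ++ p.2.toList = y ++ ' ' :: p.2.toList.tail by rw [← hp2]]
      rw [pvEndswith_lastTok y _ _ ft qt]
      simp only [decide_eq_false_iff_not]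
      intro hc
      exact fq q (List.mem_cons_of_mem p hq) (by rw [hq1, hc])
    · -- the head entry does not match: skip it
      have hne : pvStep (y ++ ' ' :: w) p = y ++ ' ' :: w := by
        unfold pvStep
        conv_lhs => rw [hp1]
        rw [pvEndswith_lastTok y w _ hw ht]
        simp [hvw]
      rw [List.foldl_cons, hne, List.find?_cons_of_neg (by rw [hp1]; simp [hvw])]
      exact ih (fun q hq => hk q (List.mem_cons_of_mem p hq))
        (fun q hq => by
          obtain ⟨a, b, c⟩ := hf q (List.mem_cons_of_mem p hq)
          exact ⟨a, b, fun r hr => c r (List.mem_cons_of_mem p hr)⟩)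

theorem pvPrefixSpace (l : List Char) : [' '].isPrefixOf l = true ↔ l.head? = some ' ' := by
  rw [List.isPrefixOf_iff_prefix]
  constructor
  · rintro ⟨t, rfl⟩; rfl
  · intro h
    cases l with
    | nil => simp at h
    | cons a t => simp at h; subst h; exact ⟨t, rfl⟩

-- rfind [' ']: no space at all
theorem pvGo_no (cs : List Char) (h : ∀ i : Nat, cs[i]? ≠ some ' ') :
    ∀ j : Nat, PySem.Chars.rfind.go cs [' '] j = -1 := by
  intro j
  induction j with
  | zero =>
    rw [PySem.Chars.rfind.go.eq_def]
    show (if [' '].isPrefixOf cs = true then (0 : Int) else -1) = -1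
    rw [if_neg]
    rw [pvPrefixSpace, List.head?_eq_getElem?]
    exact h 0
  | succ j ih =>
    rw [PySem.Chars.rfind.go.eq_def]
    show (if [' '].isPrefixOf (cs.drop (j + 1)) = true then ((j + 1 : Nat) : Int)
          else PySem.Chars.rfind.go cs [' '] j) = -1
    rw [if_neg, ih]
    rw [pvPrefixSpace, List.head?_drop]
    exact h (j + 1)

theorem pvGo_at (cs : List Char) (m : Nat) (hm : cs[m]? = some ' ')
    (hup : ∀ t : Nat, m < t → cs[t]? ≠ some ' ') :
    ∀ j : Nat, m ≤ j → PySem.Chars.rfind.go cs [' '] j = (m : Int) := by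
  intro j
  induction j with
  | zero =>
    intro hj
    have hm0 : m = 0 := Nat.le_zero.mp hj
    subst hm0
    rw [PySem.Chars.rfind.go.eq_def]
    show (if [' '].isPrefixOf cs = true then (0 : Int) else -1) = (0 : Int)
    rw [if_pos]
    rw [pvPrefixSpace, List.head?_eq_getElem?]
    exact hm
  | succ j ih =>
    intro hj
    rw [PySem.Chars.rfind.go.eq_def]
    show (if [' '].isPrefixOf (cs.drop (j + 1)) = true then ((j + 1 : Nat) : Int)
          else PySem.Chars.rfind.go cs [' '] j) = (m : Int)
    by_cases hm' : m = j + 1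
    · rw [if_pos]
      · rw [hm']
      · rw [pvPrefixSpace, List.head?_drop, ← hm']
        exact hm
    · rw [if_neg, ih (by omega)]
      rw [pvPrefixSpace, List.head?_drop]
      exact hup (j + 1) (by omega)

theorem pvRfind_nospace (cs : List Char) (h : ' ' ∉ cs) :
    PySem.Chars.rfind cs [' '] = -1 := by
  unfold PySem.Chars.rfind
  exact pvGo_no cs (fun i hi => h (List.mem_of_getElem? hi)) cs.length

theorem pvRfind_decomp (y w : List Char) (hw : ' ' ∉ w) :
    PySem.Chars.rfind (y ++ ' ' :: w) [' '] = (y.length : Int) := by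
  unfold PySem.Chars.rfind
  refine pvGo_at _ y.length ?_ ?_ _ (by simp)
  · rw [List.getElem?_append_right (le_refl _)]; simp
  · intro t ht hc
    rw [List.getElem?_append_right (by omega)] at hc
    have h1 : t - y.length = (t - y.length - 1) + 1 := by omega
    rw [h1, List.getElem?_cons_succ] at hc
    exact hw (List.mem_of_getElem? hc)

-- decomposition of a string at its LAST space
theorem pvLastSpace (cs : List Char) :
    (' ' ∉ cs) ∨ ∃ y w, cs = y ++ ' ' :: w ∧ ' ' ∉ w := by
  induction cs with
  | nil => exact Or.inl (by simp)
  | cons c t ih =>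
    rcases ih with h | ⟨y, w, rfl, hw⟩
    · by_cases hc : c = ' '
      · exact Or.inr ⟨[], t, by simp [hc], h⟩
      · refine Or.inl (fun hm => ?_)
        rcases List.mem_cons.mp hm with h1 | h1
        · exact hc h1.symm
        · exact h h1
    · exact Or.inr ⟨c :: y, w, rfl, hw⟩

theorem pvBeq_str (s t : String) : (s == t) = (s.toList == t.toList) := by
  by_cases h : s = t <;> simp [h, String.toList_inj]

theorem pvTblKeys : ∀ p ∈ pvREPLACEMENTS.items,
    p.1.toList.head? = some ' ' ∧ ' ' ∉ p.1.toList.tail := by decide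

theorem pvTblFulls : ∀ p ∈ pvREPLACEMENTS.items,
    p.2.toList.head? = some ' ' ∧ ' ' ∉ p.2.toList.tail ∧
    ∀ q ∈ pvREPLACEMENTS.items, q.1.toList ≠ ' ' :: p.2.toList.tail := by decide

-- the two implementations, over an arbitrary normalized string n
theorem pvMain (n : String) :
    pvREPLACEMENTS.items.foldl pvAstep n =
      (if PySem.Str.rfind n " " ≠ -1 then
        match pvREPLACEMENTS.get? (PySem.Str.slice n (some (PySem.Str.rfind n " ")) none) with
        | some full => PySem.Str.slice n none (some (PySem.Str.rfind n " ")) ++ full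
        | none => n
      else n) := by
  rcases pvLastSpace n.toList with h | ⟨y, w, hcs, hw⟩
  · -- no space in n: both sides return n unchanged
    have hrf : PySem.Str.rfind n " " = -1 := by
      rw [PySem.Str.rfind_eq]
      exact pvRfind_nospace _ h
    rw [hrf, if_neg (by simp)]
    rw [← String.toList_inj, pvFold_toList]
    refine pvFold_nomatch _ _ (fun p hp => ?_)
    obtain ⟨hh, _⟩ := pvTblKeys p hp
    rw [pvHead_cons _ hh, ← Bool.not_eq_true, PySem.Chars.endswith_iff]
    intro hs
    exact h (hs.subset List.mem_cons_self)
  · -- n = y ++ ' ' :: w with w space-free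
    have hrf : PySem.Str.rfind n " " = (y.length : Int) := by
      rw [PySem.Str.rfind_eq, show (" " : String).toList = [' '] from rfl, hcs]
      exact pvRfind_decomp y w hw
    rw [hrf, if_pos (by omega)]
    have hkey : (PySem.Str.slice n (some ((y.length : Nat) : Int)) none).toList = ' ' :: w := by
      rw [PySem.Str.toList_slice, PySem.Chars.slice_eq_listSlice,
          PySem.List.slice_from _ (by positivity), Int.toNat_natCast, hcs, List.drop_left]
    have hget : pvREPLACEMENTS.get? (PySem.Str.slice n (some ((y.length : Nat) : Int)) none) =
        Option.map (fun x => x.2)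
          (pvREPLACEMENTS.items.find? (fun p => p.1.toList == ' ' :: w)) := by
      unfold PySem.Dict.get?
      have hpred : (fun p : String × String =>
          p.1 == PySem.Str.slice n (some ((y.length : Nat) : Int)) none) =
          (fun p : String × String => p.1.toList == ' ' :: w) := by
        funext p
        rw [pvBeq_str, hkey]
      rw [hpred]
    rw [hget]
    cases hfind : pvREPLACEMENTS.items.find? (fun p => p.1.toList == ' ' :: w) with
    | none =>
      simp only [Option.map_none]
      rw [← String.toList_inj, pvFold_toList]
      conv_lhs => rw [hcs]
      rw [pvFold_lastTok _ pvTblKeys pvTblFulls y w hw, hfind, hcs]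
    | some p =>
      simp only [Option.map_some]
      rw [← String.toList_inj, pvFold_toList]
      conv_lhs => rw [hcs]
      rw [pvFold_lastTok _ pvTblKeys pvTblFulls y w hw, hfind]
      rw [String.toList_append, PySem.Str.toList_slice, PySem.Chars.slice_eq_listSlice,
          PySem.List.slice_to _ (by positivity), Int.toNat_natCast, hcs, List.take_left]

-- ===== VERDICT (by name: the statement is the Claim_ definition above) =====
theorem normalize_street_name_spec : Claim_equal_normalize_street_name := by
  intro street _
  unfold Spec_normalize_street_name
  simp only [normalize_street_name, normalize_street_name_alt]
  exact pvMain (PySem.Str.strip (PySem.Str.lower street))
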